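-- pv_equiv track=rewrite | github.com/carduelispsz/Python_v1 | funkcje/zad3_p.py | policz_znaki
-- ===== SOURCE A (Python) =====
-- def policz_znaki(napis, arg1='<', arg2='>'):
--     if arg1 == arg2:
--         raise ValueError ('Znaki poczatku i konca nie moga byc takie same')
--     ile_znakow = 0  # ustawiamy poczatkowe poziomy zmiennych
--     poziom = 0
--     for litera in napis:
--         if litera == arg1:
--             poziom += 1
--             #continue
--         elif litera == arg2:
--             poziom -= 1
--         elif poziom > 0:
--             ile_znakow += poziom
--     return ile_znakow
-- ===== SOURCE B (Python) =====
-- def policz_znaki(napis, arg1='<', arg2='>'):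
--     if arg1 == arg2:
--         raise ValueError('Znaki poczatku i konca nie moga byc takie same')
--     # build a prefix-sum table of nesting levels (+1 at arg1, -1 at arg2)
--     levels = [0]
--     for c in napis:
--         levels.append(levels[-1] + (1 if c == arg1 else -1 if c == arg2 else 0))
--     # then sum the level at each non-bracket character whose level is positive
--     return sum(lv for c, lv in zip(napis, levels[1:])
--                if lv > 0 and c != arg1 and c != arg2)
-- ===== Notes on version B (the rewrite author's own statement) =====
-- stated objective: alternative
-- what changed: Replaces the fused single loop with two running counters by a two-phase decomposition: first build a prefix-sum table of nesting levels, then sum the levels of positive-level non-bracket positions in a separate zip/filter pass.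
import Mathlib
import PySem

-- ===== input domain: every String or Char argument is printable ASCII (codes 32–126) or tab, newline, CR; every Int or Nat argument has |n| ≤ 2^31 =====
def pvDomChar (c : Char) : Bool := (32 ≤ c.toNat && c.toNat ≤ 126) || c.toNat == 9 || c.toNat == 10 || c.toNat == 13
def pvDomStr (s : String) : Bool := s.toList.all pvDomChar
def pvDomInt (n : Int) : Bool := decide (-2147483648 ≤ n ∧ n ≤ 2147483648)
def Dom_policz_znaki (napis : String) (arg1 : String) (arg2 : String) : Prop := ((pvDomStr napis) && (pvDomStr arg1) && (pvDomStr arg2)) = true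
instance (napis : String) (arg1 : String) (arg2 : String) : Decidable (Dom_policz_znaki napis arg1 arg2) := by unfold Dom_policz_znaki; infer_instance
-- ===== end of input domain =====

-- B replaces A's fused counter loop by a prefix-level table plus a separate zip/filter summation pass (alternative decomposition, same cost).

-- ===== PORT A =====
-- a single character `litera` compared with the string arg: equal iff arg's char list is [litera]
def pvStepA (arg1 arg2 : List Char) (st : Int × Int) (c : Char) : Int × Int :=
  if [c] = arg1 then (st.1, st.2 + 1)
  else if [c] = arg2 then (st.1, st.2 - 1)
  else if st.2 > 0 then (st.1 + st.2, st.2)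
  else st

def policz_znaki (napis : String) (arg1 : String) (arg2 : String) : Int :=
  (napis.toList.foldl (pvStepA arg1.toList arg2.toList) (0, 0)).1

-- ===== PORT B =====
-- the levels list of Source B (levels[1:]), built left-to-right carrying the last level
def pvLevels (arg1 arg2 : List Char) (cs : List Char) (acc : Int) : List Int :=
  match cs with
  | [] => []
  | c :: rest =>
    let l := acc + (if [c] = arg1 then 1 else if [c] = arg2 then -1 else 0)
    l :: pvLevels arg1 arg2 rest l

def pvStepB (arg1 arg2 : List Char) (s : Int) (p : Char × Int) : Int :=
  if p.2 > 0 ∧ ¬([p.1] = arg1) ∧ ¬([p.1] = arg2) then s + p.2 else s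

def policz_znaki_alt (napis : String) (arg1 : String) (arg2 : String) : Int :=
  (napis.toList.zip (pvLevels arg1.toList arg2.toList napis.toList 0)).foldl
    (pvStepB arg1.toList arg2.toList) 0

-- ===== PRECONDITION & SPEC =====
-- A raises ValueError when arg1 == arg2; B raises there too, so those inputs are excluded.
def Pre_policz_znaki (napis : String) (arg1 : String) (arg2 : String) : Prop := arg1 ≠ arg2
instance (napis : String) (arg1 : String) (arg2 : String) : Decidable (Pre_policz_znaki napis arg1 arg2) := by unfold Pre_policz_znaki; infer_instance
def pvWitness_policz_znaki : String × String × String := ("a<bb>c", "<", ">")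

def Spec_policz_znaki (napis : String) (arg1 : String) (arg2 : String) (out : Int) : Prop := out = policz_znaki_alt napis arg1 arg2
instance (napis : String) (arg1 : String) (arg2 : String) (out : Int) : Decidable (Spec_policz_znaki napis arg1 arg2 out) := by unfold Spec_policz_znaki; infer_instance

-- ===== CLAIM (what is proved, stated in full; the proofs are below) =====
def Claim_equal_policz_znaki : Prop := ∀ (napis : String) (arg1 : String) (arg2 : String), Dom_policz_znaki napis arg1 arg2 → Pre_policz_znaki napis arg1 arg2 → Spec_policz_znaki napis arg1 arg2 (policz_znaki napis arg1 arg2)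

-- ===== LEMMAS AND PROOFS =====
theorem pv_key (a1 a2 : List Char) (cs : List Char) (acc s : Int) :
    (cs.foldl (pvStepA a1 a2) (s, acc)).1
      = (cs.zip (pvLevels a1 a2 cs acc)).foldl (pvStepB a1 a2) s := by
  induction cs generalizing acc s with
  | nil => simp [pvLevels]
  | cons c rest ih =>
    simp only [List.foldl, pvLevels, List.zip_cons_cons]
    by_cases h1 : [c] = a1
    · simp [pvStepA, pvStepB, h1, ih]
    · by_cases h2 : [c] = a2
      · have hne : ¬ a2 = a1 := fun h => h1 (h2.trans h)
        simp [pvStepA, pvStepB, h2, hne, ih, sub_eq_add_neg]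
      · by_cases hp : acc > 0
        · simp [pvStepA, pvStepB, h1, h2, hp, ih]
        · simp [pvStepA, pvStepB, h1, h2, hp, ih]

-- ===== VERDICT (by name: the statement is the Claim_ definition above) =====
theorem policz_znaki_spec : Claim_equal_policz_znaki := by
  intro napis arg1 arg2 _ _
  unfold Spec_policz_znaki policz_znaki policz_znaki_alt
  exact pv_key _ _ _ 0 0
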